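-- pv_equiv track=rewrite | github.com/rogu3bear/adapter-os | scripts/contracts/check_api_surface.py | path_to_pattern
-- ===== SOURCE A (Python) =====
-- def path_to_pattern(path: str) -> str:
--     out = []
--     i = 0
--     while i < len(path):
--         ch = path[i]
--         if ch == "{":
--             end = path.find("}", i + 1)
--             if end == -1:
--                 out.append("\\{")
--                 i += 1
--                 continue
--             out.append("[^/]+")
--             i = end + 1
--             continue
--         if ch in ".^$*+?[]()|\\":
--             out.append("\\" + ch)
--         else:
--             out.append(ch)
--         i += 1
--     return "^" + "".join(out) + "$"
-- ===== SOURCE B (Python) =====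
-- import re
--
-- def path_to_pattern(path: str) -> str:
--     specials = ".^$*+?[]()|\\"
--     parts = []
--     for m in re.finditer(r"\{[^}]*\}|.", path, re.DOTALL):
--         tok = m.group(0)
--         if len(tok) > 1:
--             parts.append("[^/]+")
--         elif tok == "{":
--             parts.append("\\{")
--         elif tok in specials:
--             parts.append("\\" + tok)
--         else:
--             parts.append(tok)
--     return "^" + "".join(parts) + "$"
-- ===== Notes on version B (the rewrite author's own statement) =====
-- stated objective: idiomatic
-- what changed: Replaces the manual index/find while-loop with a single regex tokenization pass (each token is a whole {...} placeholder or one character) followed by a per-token rendering loop.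
import Mathlib
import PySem

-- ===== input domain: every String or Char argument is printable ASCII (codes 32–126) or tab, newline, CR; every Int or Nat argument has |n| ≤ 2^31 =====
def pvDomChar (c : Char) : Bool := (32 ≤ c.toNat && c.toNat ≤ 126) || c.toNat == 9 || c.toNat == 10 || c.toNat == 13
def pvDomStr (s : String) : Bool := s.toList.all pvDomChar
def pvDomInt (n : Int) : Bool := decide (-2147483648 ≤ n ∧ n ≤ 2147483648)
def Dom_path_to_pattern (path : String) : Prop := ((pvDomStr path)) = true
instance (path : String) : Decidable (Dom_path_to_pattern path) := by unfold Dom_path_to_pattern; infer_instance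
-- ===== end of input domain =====

-- B replaces A's manual index/find scan by regex tokenization ({...} or one char) then per-token rendering; idiomatic, same results.

-- ===== PORT A =====
-- A's `path.find("}", i+1)` on the suffix after '{': returns the suffix after the first '}', or none (find = -1).
def pvAfterBrace : List Char → Option (List Char)
  | [] => none
  | c :: cs => if c = '}' then some cs else pvAfterBrace cs

theorem pvAfterBrace_len : ∀ (cs rest : List Char), pvAfterBrace cs = some rest → rest.length < cs.length := by
  intro cs
  induction cs with
  | nil => intro rest h; simp [pvAfterBrace] at h
  | cons c cs ih =>
    intro rest h
    by_cases hc : c = '}'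
    · simp [pvAfterBrace, hc] at h; simp [← h, List.length_cons]
    · simp [pvAfterBrace, hc] at h
      have := ih rest h; simp [List.length_cons]; omega

def pvEsc : List Char := ['.', '^', '$', '*', '+', '?', '[', ']', '(', ')', '|', '\\']

-- A's while-loop: one output piece per step, advancing past the matched '}' when found.
def pvALoop : List Char → List String
  | [] => []
  | c :: cs =>
    if c = '{' then
      match hf : pvAfterBrace cs with
      | none => "\\{" :: pvALoop cs
      | some rest => "[^/]+" :: pvALoop rest
    else if c ∈ pvEsc then ("\\" ++ c.toString) :: pvALoop cs
    else c.toString :: pvALoop cs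
termination_by cs => cs.length
decreasing_by
  · simp [List.length_cons]
  · have := pvAfterBrace_len cs rest hf; simp [List.length_cons]; omega
  · simp [List.length_cons]
  · simp [List.length_cons]

def path_to_pattern (path : String) : String :=
  "^" ++ String.join (pvALoop path.toList) ++ "$"

-- ===== PORT B =====
inductive PvTok where
  | ph : PvTok                 -- a whole {...} placeholder token (len > 1)
  | one : Char → PvTok         -- a single-character token
deriving DecidableEq, Repr

-- B's regex tokenizer: `\{[^}]*\}` matches a '{' up to the first following '}', else `.` takes one char.
def pvPhSplit : List Char → Option (List Char)
  | [] => none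
  | c :: cs => if c = '}' then some cs else pvPhSplit cs

theorem pvPhSplit_len : ∀ (cs rest : List Char), pvPhSplit cs = some rest → rest.length < cs.length := by
  intro cs
  induction cs with
  | nil => intro rest h; simp [pvPhSplit] at h
  | cons c cs ih =>
    intro rest h
    by_cases hc : c = '}'
    · simp [pvPhSplit, hc] at h; simp [← h, List.length_cons]
    · simp [pvPhSplit, hc] at h
      have := ih rest h; simp [List.length_cons]; omega

def pvTokenize : List Char → List PvTok
  | [] => []
  | c :: cs =>
    if c = '{' then
      match hf : pvPhSplit cs with
      | none => PvTok.one c :: pvTokenize cs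
      | some rest => PvTok.ph :: pvTokenize rest
    else PvTok.one c :: pvTokenize cs
termination_by cs => cs.length
decreasing_by
  · simp [List.length_cons]
  · have := pvPhSplit_len cs rest hf; simp [List.length_cons]; omega
  · simp [List.length_cons]

def pvSpecials : List Char := ['.', '^', '$', '*', '+', '?', '[', ']', '(', ')', '|', '\\']

-- B's per-token rendering (the if/elif chain of the loop body).
def pvRender : PvTok → String
  | PvTok.ph => "[^/]+"
  | PvTok.one c =>
    if c = '{' then "\\{"
    else if c ∈ pvSpecials then "\\" ++ c.toString
    else c.toString

def path_to_pattern_alt (path : String) : String :=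
  "^" ++ String.join ((pvTokenize path.toList).map pvRender) ++ "$"

-- ===== PRECONDITION & SPEC =====
def Spec_path_to_pattern (path : String) (out : String) : Prop := out = path_to_pattern_alt path
instance (path : String) (out : String) : Decidable (Spec_path_to_pattern path out) := by unfold Spec_path_to_pattern; infer_instance

-- ===== CLAIM (what is proved, stated in full; the proofs are below) =====
def Claim_equal_path_to_pattern : Prop := ∀ (path : String), Dom_path_to_pattern path → Spec_path_to_pattern path (path_to_pattern path)

-- ===== LEMMAS AND PROOFS =====
theorem pvSplit_eq : ∀ cs, pvAfterBrace cs = pvPhSplit cs := by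
  intro cs; induction cs with
  | nil => rfl
  | cons c cs ih => simp [pvAfterBrace, pvPhSplit, ih]

theorem pvLoop_eq_tok : ∀ (n : ℕ) (cs : List Char), cs.length ≤ n →
    pvALoop cs = (pvTokenize cs).map pvRender := by
  intro n
  induction n with
  | zero =>
    intro cs h
    have : cs = [] := List.length_eq_zero_iff.mp (Nat.le_zero.mp h)
    subst this; simp [pvALoop, pvTokenize]
  | succ n ih =>
    intro cs h
    cases cs with
    | nil => simp [pvALoop, pvTokenize]
    | cons c cs =>
      by_cases hc : c = '{'
      · subst hc
        rw [pvALoop, pvTokenize]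
        cases hsplit : pvPhSplit cs with
        | none =>
          rw [pvSplit_eq, hsplit]
          simp [List.length_cons] at h
          simp [pvRender, ih cs h]
        | some rest =>
          rw [pvSplit_eq, hsplit]
          have hlen := pvPhSplit_len cs rest hsplit
          simp [List.length_cons] at h
          simp [pvRender, ih rest (by omega)]
      · rw [pvALoop, pvTokenize]
        simp only [hc, ite_false]
        simp [List.length_cons] at h
        by_cases he : c ∈ pvEsc
        · have : c ∈ pvSpecials := he
          simp [hc, he, this, pvRender, ih cs h]
        · have : c ∉ pvSpecials := he
          simp [hc, he, this, pvRender, ih cs h]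

-- ===== VERDICT (by name: the statement is the Claim_ definition above) =====
theorem path_to_pattern_spec : Claim_equal_path_to_pattern := by
  intro path _
  unfold Spec_path_to_pattern path_to_pattern path_to_pattern_alt
  rw [pvLoop_eq_tok path.toList.length path.toList le_rfl]
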